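-- pv_equiv track=rewrite | github.com/CivicDataLab/tender-scrapers-be | ckan_upload_scripts/oci_tender_datset_create_json_mapping.py | sanitize_package_name
-- ===== SOURCE A (Python) =====
-- def sanitize_package_name(name):
--
--     replacements = {
--         " ": "_", "'": "", "\u2013": "-", ",": "-", ":": "--",
--         "?": "", "&amp;": "-", "(": "", ")": "", "&": "-",
--         ".": "", "\u2019": ""
--     }
--     sanitized = name.lower()
--     for old, new in replacements.items():
--         sanitized = sanitized.replace(old, new)
--     return sanitized[:100]
-- ===== SOURCE B (Python) =====
-- def sanitize_package_name(name):
--     table = str.maketrans({" ": "_", "'": None, "\u2013": "-", ",": "-", ":": "--", "?": None})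
--     t = name.lower().translate(table)
--     out = []
--     i = 0
--     n = len(t)
--     while i < n:
--         if t.startswith("&amp;", i):
--             out.append("-")
--             i += 5
--         else:
--             c = t[i]
--             if c == "&":
--                 out.append("-")
--             elif c not in "().\u2019":
--                 out.append(c)
--             i += 1
--     return "".join(out)[:100]
-- ===== Notes on version B (the rewrite author's own statement) =====
-- stated objective: idiomatic
-- what changed: Replaces A's twelve sequential full-string .replace() passes with one str.translate pass for the single-character rules followed by a single left-to-right scan that handles the five-character ampersand-entity rule and the remaining per-character rules in one traversal.
import Mathlib
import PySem

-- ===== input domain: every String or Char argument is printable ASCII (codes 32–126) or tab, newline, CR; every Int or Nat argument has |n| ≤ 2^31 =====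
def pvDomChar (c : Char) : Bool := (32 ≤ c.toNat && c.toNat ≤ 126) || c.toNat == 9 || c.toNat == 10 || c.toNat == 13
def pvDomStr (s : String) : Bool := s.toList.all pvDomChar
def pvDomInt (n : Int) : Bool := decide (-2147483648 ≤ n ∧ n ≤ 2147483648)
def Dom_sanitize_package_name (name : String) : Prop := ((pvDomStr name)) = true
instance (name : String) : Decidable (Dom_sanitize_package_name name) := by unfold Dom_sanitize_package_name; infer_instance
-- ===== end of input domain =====

-- B replaces A's twelve sequential full-string replace passes by one translate pass plus a
-- single left-to-right scan (idiomatic/simpler single traversal); return values proved equal.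

-- ===== PORT A =====
def sanitize_package_name (name : String) : String :=
  let s0 := PySem.Str.lower name
  let s1 := PySem.Str.replace s0 " " "_"
  let s2 := PySem.Str.replace s1 "'" ""
  let s3 := PySem.Str.replace s2 "\u2013" "-"
  let s4 := PySem.Str.replace s3 "," "-"
  let s5 := PySem.Str.replace s4 ":" "--"
  let s6 := PySem.Str.replace s5 "?" ""
  let s7 := PySem.Str.replace s6 "&amp;" "-"
  let s8 := PySem.Str.replace s7 "(" ""
  let s9 := PySem.Str.replace s8 ")" ""
  let s10 := PySem.Str.replace s9 "&" "-"
  let s11 := PySem.Str.replace s10 "." ""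
  let s12 := PySem.Str.replace s11 "\u2019" ""
  PySem.Str.slice s12 none (some 100)

-- ===== PORT B =====
-- Source B's translate table, as the per-character expansion it denotes
def pvTransF (c : Char) : List Char :=
  if c = ' ' then ['_']
  else if c = '\'' then []
  else if c = '\u2013' then ['-']
  else if c = ',' then ['-']
  else if c = ':' then ['-', '-']
  else if c = '?' then []
  else [c]

-- the body of Source B's else-branch (emit for one character)
def pvEmit (c : Char) : List Char :=
  if c = '&' then ['-']
  else if c = '(' ∨ c = ')' ∨ c = '.' ∨ c = '\u2019' then []
  else [c]

-- Source B's while loop: t.startswith("&amp;", i) checks the prefix of the current suffix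
def pvScan : List Char → List Char
  | [] => []
  | c :: t =>
    if ['&', 'a', 'm', 'p', ';'].isPrefixOf (c :: t) then
      '-' :: pvScan ((c :: t).drop 5)
    else pvEmit c ++ pvScan t
  termination_by l => l.length
  decreasing_by all_goals (simp; try omega)

def sanitize_package_name_alt (name : String) : String :=
  let t := (PySem.Str.lower name).toList.flatMap pvTransF
  PySem.Str.slice (String.ofList (pvScan t)) none (some 100)

-- ===== PRECONDITION & SPEC =====
def Spec_sanitize_package_name (name : String) (out : String) : Prop := out = sanitize_package_name_alt name
instance (name : String) (out : String) : Decidable (Spec_sanitize_package_name name out) := by unfold Spec_sanitize_package_name; infer_instance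

-- ===== CLAIM (what is proved, stated in full; the proofs are below) =====
def Claim_equal_sanitize_package_name : Prop := ∀ (name : String), Dom_sanitize_package_name name → Spec_sanitize_package_name name (sanitize_package_name name)

-- ===== LEMMAS AND PROOFS =====

-- a single replace pass over single-character old, as a per-character map
def pvR (k : Char) (v : List Char) (x : Char) : List Char := if x = k then v else [x]

-- fuel-free reading of Python's str.replace (left-to-right, non-overlapping), for old ≠ []
def pvRep (old new : List Char) : List Char → List Char
  | [] => []
  | c :: t =>
    if old ≠ [] ∧ old.isPrefixOf (c :: t) then new ++ pvRep old new ((c :: t).drop old.length)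
    else c :: pvRep old new t
  termination_by l => l.length
  decreasing_by
  · rename_i h; simp; have := List.length_pos_iff.mpr h.1; omega
  · simp

theorem pvRep_go (old new : List Char) (hold : old ≠ []) :
    ∀ (fuel : Nat) (l acc : List Char), l.length ≤ fuel →
      PySem.Chars.replace.go old new fuel l acc = acc.reverse ++ pvRep old new l := by
  intro fuel
  induction fuel with
  | zero =>
    intro l acc hl
    have : l = [] := List.eq_nil_of_length_eq_zero (Nat.le_zero.mp hl)
    subst this
    rw [PySem.Chars.replace.go.eq_def]
    simp [pvRep]
  | succ n ih =>
    intro l acc hl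
    match l with
    | [] => rw [PySem.Chars.replace.go.eq_def]; simp [pvRep]
    | c :: t =>
      rw [PySem.Chars.replace.go.eq_def]
      simp only []
      by_cases hp : old.isPrefixOf (c :: t)
      · have hlen : old.length ≤ (c :: t).length := List.IsPrefix.length_le (List.isPrefixOf_iff_prefix.mp hp)
        have hpos : 0 < old.length := List.length_pos_iff.mpr hold
        have h1 : ((c :: t).drop old.length).length ≤ n := by
          simp only [List.length_drop, List.length_cons] at *
          omega
        rw [if_pos hp, ih _ _ h1]
        rw [pvRep]
        rw [if_pos ⟨hold, hp⟩]
        simp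
      · rw [if_neg hp, ih t (c :: acc) (by simp at hl ⊢; omega)]
        rw [pvRep, if_neg (by tauto)]
        simp

theorem pvRep_replace (old new l : List Char) (hold : old ≠ []) :
    PySem.Chars.replace l old new = pvRep old new l := by
  rw [PySem.Chars.replace]
  rw [if_neg (by simp [hold])]
  rw [pvRep_go old new hold l.length l [] (le_refl _)]
  simp

theorem pvRep_single (c : Char) (v : List Char) (l : List Char) :
    pvRep [c] v l = l.flatMap (pvR c v) := by
  induction l with
  | nil => simp [pvRep]
  | cons x t ih =>
    rw [pvRep]
    by_cases h : c = x
    · subst h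
      rw [if_pos (by simp [List.isPrefixOf])]
      simp [pvR, ih]
    · rw [if_neg (by simp [List.isPrefixOf]; intro hcx; exact h hcx)]
      simp [pvR, Ne.symm h, ih]

-- the six pre-"&amp;" single-character passes collapse to Source B's translate table
theorem pv_pre_chain (l : List Char) :
    ((((((l.flatMap (pvR ' ' ['_'])).flatMap (pvR '\'' [])).flatMap
        (pvR '\u2013' ['-'])).flatMap (pvR ',' ['-'])).flatMap
        (pvR ':' ['-', '-'])).flatMap (pvR '?' [])) = l.flatMap pvTransF := by
  induction l with
  | nil => simp
  | cons c t ih =>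
    simp only [List.flatMap_cons, List.flatMap_append]
    rw [ih]
    congr 1
    simp only [pvR, pvTransF]
    split_ifs <;> simp_all [pvR]

-- the five post-"&amp;" single-character passes collapse to Source B's emit function
theorem pv_post_chain (l : List Char) :
    (((((l.flatMap (pvR '(' [])).flatMap (pvR ')' [])).flatMap
        (pvR '&' ['-'])).flatMap (pvR '.' [])).flatMap (pvR '\u2019' [])) = l.flatMap pvEmit := by
  induction l with
  | nil => simp
  | cons c t ih =>
    simp only [List.flatMap_cons, List.flatMap_append]
    rw [ih]
    congr 1
    simp only [pvR, pvEmit]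
    split_ifs <;> (simp_all [pvR]; try tauto)

-- A's "&amp;" pass followed by the emit passes equals B's single scan
theorem pv_scan_eq (l : List Char) :
    (pvRep ['&', 'a', 'm', 'p', ';'] ['-'] l).flatMap pvEmit = pvScan l := by
  induction l using pvScan.induct with
  | case1 => simp [pvRep, pvScan]
  | case2 c t hp ih =>
    rw [pvRep, if_pos ⟨by simp, hp⟩, pvScan, if_pos hp]
    simpa [pvEmit] using ih
  | case3 c t hp ih =>
    rw [pvRep, if_neg (by tauto), pvScan, if_neg hp]
    simp [ih]

-- ===== VERDICT (by name: the statement is the Claim_ definition above) =====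
theorem sanitize_package_name_spec : Claim_equal_sanitize_package_name := by
  intro name _
  unfold Spec_sanitize_package_name sanitize_package_name sanitize_package_name_alt
  refine congrArg (fun s => PySem.Str.slice s none (some 100)) ?_
  apply String.toList_inj.mp
  have e1 : (" " : String).toList = [' '] := rfl
  have e2 : ("_" : String).toList = ['_'] := rfl
  have e3 : ("'" : String).toList = ['\''] := rfl
  have e4 : ("" : String).toList = [] := rfl
  have e5 : ("\u2013" : String).toList = ['\u2013'] := rfl
  have e6 : ("-" : String).toList = ['-'] := rfl
  have e7 : ("," : String).toList = [','] := rfl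
  have e8 : (":" : String).toList = [':'] := rfl
  have e9 : ("--" : String).toList = ['-', '-'] := rfl
  have e10 : ("?" : String).toList = ['?'] := rfl
  have e11 : ("&amp;" : String).toList = ['&', 'a', 'm', 'p', ';'] := rfl
  have e12 : ("(" : String).toList = ['('] := rfl
  have e13 : (")" : String).toList = [')'] := rfl
  have e14 : ("&" : String).toList = ['&'] := rfl
  have e15 : ("." : String).toList = ['.'] := rfl
  have e16 : ("\u2019" : String).toList = ['\u2019'] := rfl
  simp only [PySem.Str.toList_replace, e1, e2, e3, e4, e5, e6, e7, e8, e9, e10,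
    e11, e12, e13, e14, e15, e16]
  rw [pvRep_replace _ _ _ (by decide), pvRep_replace _ _ _ (by decide),
      pvRep_replace _ _ _ (by decide), pvRep_replace _ _ _ (by decide),
      pvRep_replace _ _ _ (by decide), pvRep_replace _ _ _ (by decide),
      pvRep_replace _ _ _ (by decide), pvRep_replace _ _ _ (by decide),
      pvRep_replace _ _ _ (by decide), pvRep_replace _ _ _ (by decide),
      pvRep_replace _ _ _ (by decide), pvRep_replace _ _ _ (by decide)]
  simp only [pvRep_single]
  rw [pv_pre_chain, pv_post_chain, pv_scan_eq]
  simp
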